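-- pv_equiv track=rewrite | github.com/ashizawaN/LeetCode | #506-2_Relative_Ranks.py | findRelativeRanks
-- ===== SOURCE A (Python) =====
-- from typing import List
--
-- def findRelativeRanks(score: List[int]) -> List[str]:
--
--     MIN_SCORE = 0
--     MAX_SCORE = 10**6
--     MIN_LENGTH = 1
--     MAX_LENGTH = 10**4
--     count = 0
--     assert type(score) == list, "The type of score should be list."
--     for i in range(len(score)-1):
--         if type(score[i]) != "int":
--             count += 1
--     if count == 0:
--         assert "The type of a value in nums sould be integer."
--     if len(score) < MIN_LENGTH or len(score) > MAX_LENGTH: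
--         raise ValueError("The range of score should be 1 or more and 10**4 or less.")
--     for i in range(len(score)-1):
--         if score[i] < MIN_SCORE or score[i] > MAX_SCORE:
--             raise ValueError("The value of score should be 1 or more and 10**6 or less")
--
--     sort_score = sorted(score, reverse=True)
--     ans = {}
--     for i in range(len(score)):
--         if i == 0:
--             ans[sort_score[i]] = "Gold Medal"
--         elif i == 1:
--             ans[sort_score[i]] = "Silver Medal"
--         elif i == 2:
--             ans[sort_score[i]] = "Bronze Medal"
--         else:
--             ans[sort_score[i]] = str(i+1)
--     return list(map(lambda x: ans[x], score))
-- ===== SOURCE B (Python) =====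
-- from typing import List
--
-- def findRelativeRanks(score: List[int]) -> List[str]:
--     out = []
--     for x in score:
--         k = sum(1 for s in score if s >= x) - 1
--         if k == 0:
--             out.append("Gold Medal")
--         elif k == 1:
--             out.append("Silver Medal")
--         elif k == 2:
--             out.append("Bronze Medal")
--         else:
--             out.append(str(k + 1))
--     return out
-- ===== Notes on version B (the rewrite author's own statement) =====
-- stated objective: alternative
-- what changed: B drops A's sort and value-keyed dict (and A's validation raises): each element's rank is computed directly as count(s >= x) - 1, which for duplicates coincides with the last position A's dict overwriting assigns.
import Mathlib
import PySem

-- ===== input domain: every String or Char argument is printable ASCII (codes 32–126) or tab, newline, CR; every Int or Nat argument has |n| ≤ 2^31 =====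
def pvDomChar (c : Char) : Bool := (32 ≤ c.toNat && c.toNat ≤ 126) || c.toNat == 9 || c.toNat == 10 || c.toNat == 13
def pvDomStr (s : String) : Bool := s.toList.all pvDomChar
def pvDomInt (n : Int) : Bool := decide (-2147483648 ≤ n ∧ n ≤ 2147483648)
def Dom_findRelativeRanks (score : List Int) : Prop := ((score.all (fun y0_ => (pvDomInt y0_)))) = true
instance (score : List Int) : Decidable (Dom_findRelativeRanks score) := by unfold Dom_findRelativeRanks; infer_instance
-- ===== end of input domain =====

-- B replaces A's sort + value-keyed dict by a direct per-element count rank (alternative decomposition, not faster);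
-- B performs none of A's validation, so it returns labels where A raises ValueError (see Raises_).

-- ===== PORT A =====
def findRelativeRanks (score : List Int) : List String :=
  -- count loop: 'type(score[i]) != "int"' compares a type object to a string, hence is always True;
  -- the following 'assert "…"' asserts a non-empty string and always passes, so count is dead state
  let _count : Int := (PySem.List.pyRange 0 ((score.length : Int) - 1) 1).foldl (fun c _i => c + 1) 0
  -- the two ValueError checks (length range; all but the LAST element in [0, 10**6]) are Pre_ below
  let sort_score := PySem.List.sorted score (fun s => s) true
  let ans : PySem.Dict Int String :=
    (PySem.List.pyRange 0 (score.length : Int) 1).foldl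
      (fun d i =>
        if i == 0 then d.insert (PySem.List.pyGetD sort_score i 0) "Gold Medal"
        else if i == 1 then d.insert (PySem.List.pyGetD sort_score i 0) "Silver Medal"
        else if i == 2 then d.insert (PySem.List.pyGetD sort_score i 0) "Bronze Medal"
        else d.insert (PySem.List.pyGetD sort_score i 0) (PySem.Int.toStr (i + 1)))
      PySem.Dict.empty
  -- ans[x] never raises KeyError: every x ∈ score is a key of ans
  score.map (fun x => (ans.get? x).getD "")

-- ===== PORT B =====
def findRelativeRanks_alt (score : List Int) : List String :=
  score.map (fun x =>
    let k : Int := score.foldl (fun c s => if s ≥ x then c + 1 else c) 0 - 1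
    if k = 0 then "Gold Medal"
    else if k = 1 then "Silver Medal"
    else if k = 2 then "Bronze Medal"
    else PySem.Int.toStr (k + 1))

-- ===== PRECONDITION & SPEC =====
-- Pre_ is exactly where the Python A returns: A raises ValueError on an empty or over-long list, and on any
-- element OTHER THAN THE LAST outside [0, 10**6] (A's range loop stops one short of the end).
def Pre_findRelativeRanks (score : List Int) : Prop :=
  score ≠ [] ∧ score.length ≤ 10000 ∧ ∀ x ∈ score.dropLast, 0 ≤ x ∧ x ≤ 1000000
instance (score : List Int) : Decidable (Pre_findRelativeRanks score) := by
  unfold Pre_findRelativeRanks; infer_instance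
def pvWitness_findRelativeRanks : List Int := [10, 3, 5]

def Spec_findRelativeRanks (score : List Int) (out : List String) : Prop := out = findRelativeRanks_alt score
instance (score : List Int) (out : List String) : Decidable (Spec_findRelativeRanks score out) := by
  unfold Spec_findRelativeRanks; infer_instance

-- ===== CLAIM (what is proved, stated in full; the proofs are below) =====
def Claim_equal_findRelativeRanks : Prop := ∀ (score : List Int), Dom_findRelativeRanks score → Pre_findRelativeRanks score → Spec_findRelativeRanks score (findRelativeRanks score)

-- ===== LEMMAS AND PROOFS =====

-- the label A assigns at sorted position i (also the shape of B's branch on k = i)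
def pvLabel (i : Int) : String :=
  if i = 0 then "Gold Medal"
  else if i = 1 then "Silver Medal"
  else if i = 2 then "Bronze Medal"
  else PySem.Int.toStr (i + 1)

theorem pvGetFoldNotMem (t : List Int) : ∀ (i0 : Int) (d : PySem.Dict Int String) (x : Int), x ∉ t →
    ((PySem.List.enumerate t i0).foldl (fun d p => d.insert p.2 (pvLabel p.1)) d).get? x = d.get? x := by
  induction t with
  | nil => intro i0 d x _; simp [PySem.List.enumerate]
  | cons a t ih =>
    intro i0 d x hx
    rw [PySem.List.enumerate_cons]
    simp only [List.foldl_cons]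
    rw [ih (i0 + 1) _ x (fun h => hx (List.mem_cons_of_mem _ h))]
    apply PySem.Dict.get?_insert_of_ne
    intro h
    exact hx (h ▸ List.mem_cons_self)

theorem pvGetFold (l : List Int) : ∀ (i0 : Int) (d : PySem.Dict Int String) (x : Int),
    l.Pairwise (fun a b => b ≤ a) → x ∈ l →
    ((PySem.List.enumerate l i0).foldl (fun d p => d.insert p.2 (pvLabel p.1)) d).get? x
      = some (pvLabel (i0 + (l.countP (fun s => decide (x ≤ s)) : Int) - 1)) := by
  induction l with
  | nil => intro _ _ _ _ hx; simp at hx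
  | cons a t ih =>
    intro i0 d x hp hx
    rw [PySem.List.enumerate_cons]
    simp only [List.foldl_cons]
    rcases List.pairwise_cons.mp hp with ⟨ha, hpt⟩
    by_cases hxt : x ∈ t
    · have hxa : x ≤ a := ha x hxt
      rw [ih (i0 + 1) _ x hpt hxt]
      have hc : (a :: t).countP (fun s => decide (x ≤ s)) = t.countP (fun s => decide (x ≤ s)) + 1 := by
        simp [hxa]
      rw [hc]
      have harg : i0 + 1 + ((t.countP (fun s => decide (x ≤ s)) : Nat) : Int) - 1
          = i0 + ((t.countP (fun s => decide (x ≤ s)) + 1 : Nat) : Int) - 1 := by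
        push_cast; ring
      rw [harg]
    · have hxa : x = a := by
        rcases List.mem_cons.mp hx with h | h
        · exact h
        · exact absurd h hxt
      subst hxa
      have hct : t.countP (fun s => decide (x ≤ s)) = 0 := by
        rw [List.countP_eq_zero]
        intro s hs
        have h1 : s ≤ x := ha s hs
        have h2 : s ≠ x := fun h => hxt (h ▸ hs)
        simp only [decide_eq_true_eq]
        omega
      have hc : (x :: t).countP (fun s => decide (x ≤ s)) = 1 := by
        simp [hct]
      rw [pvGetFoldNotMem t _ _ x hxt, PySem.Dict.get?_insert_self, hc]
      norm_num

theorem findRelativeRanks_spec : Claim_equal_findRelativeRanks := by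
  intro score _dom _pre
  unfold Spec_findRelativeRanks findRelativeRanks findRelativeRanks_alt
  apply List.map_congr_left
  intro x hx
  set ss := PySem.List.sorted score (fun s => s) true with hss
  have hlen : ss.length = score.length := PySem.List.length_sorted _ _ _
  -- A's dict-building fold is the fold over enumerate ss 0 with body insert key (pvLabel i)
  have hfold :
      (PySem.List.pyRange 0 (score.length : Int) 1).foldl
        (fun d i =>
          if i == 0 then d.insert (PySem.List.pyGetD ss i 0) "Gold Medal"
          else if i == 1 then d.insert (PySem.List.pyGetD ss i 0) "Silver Medal"
          else if i == 2 then d.insert (PySem.List.pyGetD ss i 0) "Bronze Medal"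
          else d.insert (PySem.List.pyGetD ss i 0) (PySem.Int.toStr (i + 1)))
        PySem.Dict.empty
      = (PySem.List.enumerate ss 0).foldl (fun d p => d.insert p.2 (pvLabel p.1)) PySem.Dict.empty := by
    rw [PySem.List.enumerate_eq_map_pyRange (d := 0), List.foldl_map]
    have hl : PySem.List.len ss = (score.length : Int) := by
      simp [PySem.List.len, hlen]
    rw [hl]
    apply PySem.List.foldl_congr_mem
    intro d i _
    simp only [pvLabel, beq_iff_eq]
    split_ifs <;> rfl
  rw [hfold]
  have hmem : x ∈ ss := (PySem.List.mem_sorted _ _ _ _).mpr hx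
  have hpw : ss.Pairwise (fun a b => b ≤ a) := PySem.List.sorted_pairwise_rev score (fun s => s)
  rw [pvGetFold ss 0 _ x hpw hmem]
  have hperm : ss.Perm score := PySem.List.sorted_perm _ _ _
  rw [hperm.countP_eq]
  -- B's counting loop is countP
  rw [PySem.List.foldl_ite_add_one (p := fun s => x ≤ s)]
  simp only [Option.getD_some, pvLabel, zero_add]
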